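-- pv_equiv track=rewrite | github.com/marticardoso/AMMM.Project | BRKGA/Utils/Checks.py | CheckRest
-- ===== SOURCE A (Python) =====
-- def CheckRest(schedule):
--     isWorking = False
--     restConsec = 0
--     for i in range(len(schedule)):
--         if(schedule[i]==1):
--             if(restConsec>1 and isWorking):
--                 return False
--             restConsec = 0
--             isWorking = True
--         else:
--             restConsec +=1
--     return True
-- ===== SOURCE B (Python) =====
-- def CheckRest(schedule):
--     ones = [i for i, v in enumerate(schedule) if v == 1]
--     for a, b in zip(ones, ones[1:]):
--         if b - a >= 3:
--             return False
--     return True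
-- ===== Notes on version B (the rewrite author's own statement) =====
-- stated objective: alternative
-- what changed: Replaces A's single-pass flag/counter state machine with materializing the indices of working days and scanning adjacent index pairs for a gap of at least 3.
import Mathlib
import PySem

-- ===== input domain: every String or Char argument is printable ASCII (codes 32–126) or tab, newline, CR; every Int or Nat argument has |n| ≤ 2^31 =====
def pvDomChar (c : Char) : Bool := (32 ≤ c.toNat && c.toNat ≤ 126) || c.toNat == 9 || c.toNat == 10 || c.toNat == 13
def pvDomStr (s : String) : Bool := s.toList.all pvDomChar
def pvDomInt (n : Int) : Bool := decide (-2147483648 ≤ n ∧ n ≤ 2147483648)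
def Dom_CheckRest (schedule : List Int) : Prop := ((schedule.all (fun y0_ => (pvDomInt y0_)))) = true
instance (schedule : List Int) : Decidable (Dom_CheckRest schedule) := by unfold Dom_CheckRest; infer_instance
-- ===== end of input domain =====

-- B replaces A's flag/counter state machine with a working-day index list plus an adjacent-gap scan (alternative decomposition, same cost).
-- ===== PORT A =====
-- loop state: remaining schedule, isWorking, restConsec
def CheckRestLoop : List Int → Bool → Int → Bool
  | [], _, _ => true
  | x :: xs, isWorking, restConsec =>
    if x == 1 then
      if restConsec > 1 && isWorking then false
      else CheckRestLoop xs true 0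
    else CheckRestLoop xs isWorking (restConsec + 1)

def CheckRest (schedule : List Int) : Bool := CheckRestLoop schedule false 0

-- ===== PORT B =====
-- ones = [i for i, v in enumerate(schedule) if v == 1]  (index accumulator k)
def onesIdx : List Int → Int → List Int
  | [], _ => []
  | x :: xs, k => if x == 1 then k :: onesIdx xs (k + 1) else onesIdx xs (k + 1)

-- scan over adjacent pairs of the index list
def gapsOk : List Int → Bool
  | a :: b :: t => if b - a ≥ 3 then false else gapsOk (b :: t)
  | _ => true

def CheckRest_alt (schedule : List Int) : Bool := gapsOk (onesIdx schedule 0)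

-- ===== PRECONDITION & SPEC =====
def Spec_CheckRest (schedule : List Int) (out : Bool) : Prop := out = CheckRest_alt schedule
instance (schedule : List Int) (out : Bool) : Decidable (Spec_CheckRest schedule out) := by unfold Spec_CheckRest; infer_instance

-- ===== CLAIM (what is proved, stated in full; the proofs are below) =====
def Claim_equal_CheckRest : Prop := ∀ (schedule : List Int), Dom_CheckRest schedule → Spec_CheckRest schedule (CheckRest schedule)

-- ===== LEMMAS AND PROOFS =====

-- ===== VERDICT (by name: the statement is the Claim_ definition above) =====
-- invariant: the state machine from state (isWorking, restConsec) equals the gap scan on the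
-- remaining ones indices, with (when isWorking) a virtual previous working day at k - restConsec - 1.
theorem loop_eq_gaps : ∀ (xs : List Int) (k rc : Int),
    CheckRestLoop xs true rc = gapsOk ((k - rc - 1) :: onesIdx xs k)
    ∧ CheckRestLoop xs false rc = gapsOk (onesIdx xs k) := by
  intro xs
  induction xs with
  | nil => intro k rc; simp [CheckRestLoop, onesIdx, gapsOk]
  | cons x xs ih =>
    intro k rc
    by_cases hx : x = 1
    · have h1 := (ih (k + 1) 0).1
      constructor
      · simp only [CheckRestLoop, onesIdx, hx, if_pos rfl]
        simp only [show ((1:Int) == 1) = true from by decide, if_true]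
        rw [gapsOk]
        by_cases hrc : rc > 1
        · rw [if_pos (by omega : k - (k - rc - 1) ≥ 3)]
          simp [hrc]
        · rw [if_neg (by omega : ¬ k - (k - rc - 1) ≥ 3)]
          have hrc' : (rc > 1 && true) = false := by simp [hrc]
          rw [hrc']
          simpa using h1
      · simp only [CheckRestLoop, onesIdx, hx]
        simp only [show ((1:Int) == 1) = true from by decide, if_true]
        simp only [Bool.and_false, Bool.false_eq_true, if_false]
        simpa using h1
    · have h1 := (ih (k + 1) (rc + 1)).1
      have h2 := (ih (k + 1) (rc + 1)).2
      have hne : ¬ (x == 1) = true := by simpa using hx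
      constructor
      · simp only [CheckRestLoop, onesIdx, if_neg hne]
        rw [h1]
        have : k + 1 - (rc + 1) - 1 = k - rc - 1 := by ring
        rw [this]
      · simp only [CheckRestLoop, onesIdx, if_neg hne]
        exact h2

theorem CheckRest_spec : Claim_equal_CheckRest := by
  intro schedule _
  unfold Spec_CheckRest CheckRest CheckRest_alt
  exact (loop_eq_gaps schedule 0 0).2
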